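-- pv_equiv track=rewrite | github.com/IlyasDevelopment/Yandex-Algorithm-Training | Homework_2/B_define_seq_type/main.py | define_sequence_type
-- ===== SOURCE A (Python) =====
-- def define_sequence_type(sequence):
--     asc = True
--     const = True
--     desc = True
--     weak = False
--     previous_element = sequence[0]
--     for element in sequence[1:]:
--         const &= element == previous_element
--         weak |= element == previous_element
--         asc &= element >= previous_element
--         desc &= element <= previous_element
--         previous_element = element
--     if const:
--         return 'CONSTANT'
--     elif asc:
--         return 'WEAKLY ASCENDING' if weak else 'ASCENDING'
--     elif desc:
--         return 'WEAKLY DESCENDING' if weak else 'DESCENDING'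
--     else:
--         return 'RANDOM'
-- ===== SOURCE B (Python) =====
-- def define_sequence_type(sequence):
--     distinct = len(set(sequence))
--     if distinct == 1:
--         return 'CONSTANT'
--     s = sorted(sequence)
--     if sequence == s:
--         return 'ASCENDING' if distinct == len(sequence) else 'WEAKLY ASCENDING'
--     if sequence == list(reversed(s)):
--         return 'DESCENDING' if distinct == len(sequence) else 'WEAKLY DESCENDING'
--     return 'RANDOM'
-- ===== Notes on version B (the rewrite author's own statement) =====
-- stated objective: alternative
-- what changed: Replaces A's fused adjacent-pair flag loop by a sort-and-set characterisation: monotonicity is decided by comparing the sequence with sorted(sequence) and its reversal, and constancy/weakness by the cardinality of set(sequence).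
import Mathlib
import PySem

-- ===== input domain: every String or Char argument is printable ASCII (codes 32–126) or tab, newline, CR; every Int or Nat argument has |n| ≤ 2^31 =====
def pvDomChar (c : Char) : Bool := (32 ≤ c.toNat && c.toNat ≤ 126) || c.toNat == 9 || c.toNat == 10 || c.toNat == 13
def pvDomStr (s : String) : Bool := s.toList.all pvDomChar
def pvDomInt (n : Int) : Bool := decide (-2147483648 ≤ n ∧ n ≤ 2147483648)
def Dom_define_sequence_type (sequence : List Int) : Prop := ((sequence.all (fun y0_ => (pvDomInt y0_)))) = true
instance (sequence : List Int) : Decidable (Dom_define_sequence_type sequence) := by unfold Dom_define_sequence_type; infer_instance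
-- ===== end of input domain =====

-- B replaces A's fused adjacent-pair flag loop by a sort-and-set characterisation:
-- compare the sequence with sorted(sequence) / its reversal, and use |set(sequence)|
-- for constancy and weakness (objective: alternative).

-- ===== PORT A =====
-- loop body of A: state (asc, const, desc, weak, previous_element)
def pvStepA (s : Bool × Bool × Bool × Bool × Int) (e : Int) : Bool × Bool × Bool × Bool × Int :=
  (s.1 && decide (e ≥ s.2.2.2.2),
   s.2.1 && (e == s.2.2.2.2),
   s.2.2.1 && decide (e ≤ s.2.2.2.2),
   s.2.2.2.1 || (e == s.2.2.2.2),
   e)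

def define_sequence_type (sequence : List Int) : String :=
  match PySem.List.pyGet? sequence 0 with
  | none => ""  -- sequence[0] raises IndexError on []; excluded by Pre_
  | some p0 =>
    let r := (PySem.List.slice sequence (some 1) none).foldl pvStepA (true, true, true, false, p0)
    if r.2.1 then "CONSTANT"
    else if r.1 then (if r.2.2.2.1 then "WEAKLY ASCENDING" else "ASCENDING")
    else if r.2.2.1 then (if r.2.2.2.1 then "WEAKLY DESCENDING" else "DESCENDING")
    else "RANDOM"

-- ===== PORT B =====
def define_sequence_type_alt (sequence : List Int) : String :=
  let distinct := (PySem.Set.ofList sequence).length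
  if distinct == 1 then "CONSTANT"
  else
    let s := PySem.List.sorted sequence (fun x => x) false
    if sequence == s then
      (if distinct == sequence.length then "ASCENDING" else "WEAKLY ASCENDING")
    else if sequence == s.reverse then
      (if distinct == sequence.length then "DESCENDING" else "WEAKLY DESCENDING")
    else "RANDOM"

-- ===== PRECONDITION & SPEC =====
-- A raises IndexError reading the first element when the list is empty; Pre_ excludes exactly the empty list.
def Pre_define_sequence_type (sequence : List Int) : Prop := sequence ≠ []
instance (sequence : List Int) : Decidable (Pre_define_sequence_type sequence) := by unfold Pre_define_sequence_type; infer_instance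
def pvWitness_define_sequence_type : List Int := [1, 2, 2]

def Spec_define_sequence_type (sequence : List Int) (out : String) : Prop := out = define_sequence_type_alt sequence
instance (sequence : List Int) (out : String) : Decidable (Spec_define_sequence_type sequence out) := by unfold Spec_define_sequence_type; infer_instance

-- ===== CLAIM =====
def Claim_equal_define_sequence_type : Prop := ∀ (sequence : List Int), Dom_define_sequence_type sequence → Pre_define_sequence_type sequence → Spec_define_sequence_type sequence (define_sequence_type sequence)

-- ===== LEMMAS AND PROOFS =====

-- the fold of A's loop computes, component-wise, scans over adjacent pairs
theorem pvFoldA_eq (l : List Int) : ∀ (a c d w : Bool) (p : Int),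
    l.foldl pvStepA (a, c, d, w, p) =
      (a && ((p :: l).zip l).all (fun q => decide (q.1 ≤ q.2)),
       c && ((p :: l).zip l).all (fun q => q.1 == q.2),
       d && ((p :: l).zip l).all (fun q => decide (q.1 ≥ q.2)),
       w || ((p :: l).zip l).any (fun q => q.1 == q.2),
       l.getLastD p) := by
  induction l with
  | nil => simp
  | cons e t ih =>
    intro a c d w p
    simp only [List.foldl_cons, pvStepA, ih, List.zip_cons_cons, List.all_cons, List.any_cons,
      List.getLastD_cons, Bool.and_assoc, Bool.or_assoc]
    simp [ge_iff_le, Bool.beq_comm]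

-- adjacent-pair all-scan = IsChain
theorem pvZipAll_iff (f : Int × Int → Bool) (l : List Int) :
    ((l.zip l.tail).all f = true) ↔ List.IsChain (fun a b => f (a, b) = true) l := by
  induction l with
  | nil => simp
  | cons a t ih =>
    cases t with
    | nil => simp
    | cons b u =>
      rw [List.tail_cons, List.zip_cons_cons, List.all_cons, List.isChain_cons_cons,
        Bool.and_eq_true, ← ih]
      simp

theorem pvZipAny_iff (l : List Int) :
    ((l.zip l.tail).any (fun q => q.1 == q.2) = false) ↔ List.IsChain (fun a b : Int => a ≠ b) l := by
  have h := pvZipAll_iff (fun q => !(q.1 == q.2)) l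
  simp only [List.all_eq_true, Bool.not_eq_true', beq_eq_false_iff_ne] at h
  rw [← h, List.any_eq_false]
  simp

theorem pvChain_lt (l : List Int) (h1 : List.IsChain (· ≤ ·) l) (h2 : List.IsChain (fun a b : Int => a ≠ b) l) :
    List.IsChain (· < ·) l := by
  induction l with
  | nil => exact .nil
  | cons a t ih =>
    cases t with
    | nil => exact .singleton _
    | cons b u =>
      rw [List.isChain_cons_cons] at h1 h2 ⊢
      exact ⟨lt_of_le_of_ne h1.1 h2.1, ih h1.2 h2.2⟩

-- constancy: the fold's const-flag ↔ |set(l)| = 1 (nonempty l)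
theorem pvConst_iff (p0 : Int) (rest : List Int) :
    (((p0 :: rest).zip rest).all (fun q => q.1 == q.2) = true) ↔
      (PySem.Set.ofList (p0 :: rest)).length = 1 := by
  have hz := pvZipAll_iff (fun q => q.1 == q.2) (p0 :: rest)
  rw [List.tail_cons] at hz
  rw [hz]
  constructor
  · intro h
    have hpw : (p0 :: rest).Pairwise (fun a b : Int => a = b) := by
      rw [← List.isChain_iff_pairwise]
      simpa using h
    have hall : ∀ x ∈ p0 :: rest, x = p0 := by
      intro x hx
      rcases List.mem_cons.1 hx with h1 | h2
      · exact h1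
      · exact ((List.pairwise_cons.1 hpw).1 x h2).symm
    have hperm : (PySem.Set.ofList (p0 :: rest)).Perm [p0] := by
      rw [List.perm_ext_iff_of_nodup (PySem.Set.nodup_ofList _) (List.nodup_singleton p0)]
      intro x
      rw [PySem.Set.mem_ofList]
      constructor
      · intro hx; simpa using hall x hx
      · intro hx; simp only [List.mem_singleton] at hx; subst hx; exact List.mem_cons_self
    simpa using hperm.length_eq
  · intro h
    obtain ⟨y, hy⟩ := List.length_eq_one_iff.1 h
    have hall : ∀ x ∈ p0 :: rest, x = y := by
      intro x hx
      have : x ∈ PySem.Set.ofList (p0 :: rest) := (PySem.Set.mem_ofList _ _).2 hx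
      rw [hy] at this; simpa using this
    have hpw : (p0 :: rest).Pairwise (fun a b : Int => a = b) :=
      List.pairwise_of_forall_mem_list (fun a ha b hb => (hall a ha).trans (hall b hb).symm)
    have := List.isChain_iff_pairwise.2 hpw
    simpa using this

-- ascending: the fold's asc-flag ↔ l = sorted(l)
theorem pvAsc_iff (l : List Int) :
    ((l.zip l.tail).all (fun q => decide (q.1 ≤ q.2)) = true) ↔
      l = PySem.List.sorted l (fun x => x) false := by
  rw [pvZipAll_iff]
  constructor
  · intro h
    have hc : List.IsChain (· ≤ ·) l := by simpa using h
    exact (PySem.List.sorted_eq_self_of_pairwise l (fun x => x)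
      (by simpa using List.isChain_iff_pairwise.1 hc)).symm
  · intro h
    have hpw : l.Pairwise (fun a b : Int => a ≤ b) := by
      rw [h]
      simpa using PySem.List.sorted_pairwise l (fun x : Int => x)
    simpa using List.isChain_iff_pairwise.2 hpw

-- descending: the fold's desc-flag ↔ l = reversed(sorted(l))
theorem pvDesc_iff (l : List Int) :
    ((l.zip l.tail).all (fun q => decide (q.1 ≥ q.2)) = true) ↔
      l = (PySem.List.sorted l (fun x => x) false).reverse := by
  rw [pvZipAll_iff]
  constructor
  · intro h
    have hc : List.IsChain (fun a b : Int => b ≤ a) l := by simpa [ge_iff_le] using h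
    have hrev : l.reverse.Pairwise (fun a b : Int => a ≤ b) := by
      rw [List.pairwise_reverse]
      exact List.isChain_iff_pairwise.1 hc
    have h1 : PySem.List.sorted l.reverse (fun x : Int => x) false = l.reverse :=
      PySem.List.sorted_eq_self_of_pairwise l.reverse (fun x => x) (by simpa using hrev)
    have h2 : PySem.List.sorted l (fun x : Int => x) false = l.reverse :=
      (PySem.List.sorted_eq_sorted_of_perm l l.reverse (fun x => x)
        (fun _ _ hxy => hxy) l.reverse_perm.symm).trans h1
    rw [h2, List.reverse_reverse]
  · intro h
    have h2 : PySem.List.sorted l (fun x : Int => x) false = l.reverse := by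
      have := congrArg List.reverse h
      rwa [List.reverse_reverse, eq_comm] at this
    have hrev : l.reverse.Pairwise (fun a b : Int => a ≤ b) := by
      rw [← h2]; simpa using PySem.List.sorted_pairwise l (fun x : Int => x)
    have hc : l.Pairwise (fun a b : Int => b ≤ a) := List.pairwise_reverse.1 hrev
    have := List.isChain_iff_pairwise.2 hc
    simpa [ge_iff_le] using this

-- |set(l)| = len(l) ↔ Nodup
theorem pvDistinct_iff (l : List Int) : (PySem.Set.ofList l).length = l.length ↔ l.Nodup := by
  induction l with
  | nil => simp [PySem.Set.ofList]
  | cons x xs ih =>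
    rw [PySem.Set.ofList_cons, List.nodup_cons]
    by_cases hx : x ∈ xs
    · have hmem : x ∈ PySem.Set.ofList xs := (PySem.Set.mem_ofList _ _).2 hx
      have hlt : ((PySem.Set.ofList xs).discard x).length < (PySem.Set.ofList xs).length := by
        apply List.length_filter_lt_length_iff_exists.2
        exact ⟨x, hmem, by simp⟩
      have hle := PySem.Set.length_ofList_le xs
      constructor
      · intro h; simp only [List.length_cons] at h; omega
      · intro h; exact absurd hx h.1
    · have hdis : (PySem.Set.ofList xs).discard x = PySem.Set.ofList xs := by
        apply List.filter_eq_self.2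
        intro y hy
        have hyx : y ∈ xs := (PySem.Set.mem_ofList _ _).1 hy
        have hne : y ≠ x := fun he => hx (he ▸ hyx)
        simpa using hne
      rw [hdis]
      simp only [List.length_cons, Nat.add_right_cancel_iff, ih]
      exact ⟨fun h => ⟨hx, h⟩, fun h => h.2⟩

-- under a monotone chain, 'no adjacent duplicate' ↔ Nodup
theorem pvWeak_iff_asc (l : List Int) (h : List.IsChain (· ≤ ·) l) :
    ((l.zip l.tail).any (fun q => q.1 == q.2) = false) ↔ l.Nodup := by
  rw [pvZipAny_iff]
  constructor
  · intro h2
    exact ((List.isChain_iff_pairwise.1 (pvChain_lt l h h2)).imp (fun hab => ne_of_lt hab))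
  · intro hnd
    exact hnd.isChain

theorem pvWeak_iff_desc (l : List Int) (h : List.IsChain (fun a b : Int => b ≤ a) l) :
    ((l.zip l.tail).any (fun q => q.1 == q.2) = false) ↔ l.Nodup := by
  rw [pvZipAny_iff]
  constructor
  · intro h2
    have hgt : List.IsChain (fun a b : Int => b < a) l := by
      have hrev := pvChain_lt l.reverse (List.isChain_reverse.2 h)
        (List.isChain_reverse.2 (by simpa [ne_comm] using h2))
      simpa using List.isChain_reverse.1 hrev
    exact ((List.isChain_iff_pairwise.1 hgt).imp (fun hab => (ne_of_lt hab).symm))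
  · intro hnd
    exact hnd.isChain

-- ===== VERDICT =====
theorem define_sequence_type_spec : Claim_equal_define_sequence_type := by
  intro sequence _ hpre
  match sequence with
  | [] => exact absurd rfl hpre
  | p0 :: rest =>
    show define_sequence_type (p0 :: rest) = define_sequence_type_alt (p0 :: rest)
    simp only [define_sequence_type, define_sequence_type_alt, PySem.List.slice_from_one,
      List.tail_cons]
    simp only [PySem.List.pyGet?, PySem.List.pyIdx?]
    norm_num
    simp only [pvFoldA_eq, Bool.true_and, Bool.false_or]
    have hC := pvConst_iff p0 rest
    have hA := pvAsc_iff (p0 :: rest)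
    have hD := pvDesc_iff (p0 :: rest)
    have hN := pvDistinct_iff (p0 :: rest)
    simp only [List.tail_cons] at hA hD
    simp only [List.length_cons] at hN
    by_cases hc : (((p0 :: rest).zip rest).all fun q => q.1 == q.2) = true
    · rw [if_pos hc, if_pos (hC.1 hc)]
    · rw [if_neg hc, if_neg (fun h => hc (hC.2 h))]
      by_cases ha : (((p0 :: rest).zip rest).all fun q => decide (q.1 ≤ q.2)) = true
      · rw [if_pos ha, if_pos (hA.1 ha)]
        have hch : List.IsChain (· ≤ ·) (p0 :: rest) := by
          simpa using (pvZipAll_iff (fun q => decide (q.1 ≤ q.2)) (p0 :: rest)).1 (by simpa using ha)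
        have hW := pvWeak_iff_asc (p0 :: rest) hch
        simp only [List.tail_cons] at hW
        by_cases hwk : (((p0 :: rest).zip rest).any fun q => q.1 == q.2) = true
        · have hnd : ¬ (p0 :: rest).Nodup := fun h => by
            rw [hW.2 h] at hwk; exact Bool.false_ne_true hwk
          rw [if_pos hwk, if_neg (fun h => hnd (hN.1 h))]
        · have hnd : (p0 :: rest).Nodup := hW.1 (Bool.eq_false_iff.2 hwk)
          rw [if_neg hwk, if_pos (hN.2 hnd)]
      · rw [if_neg ha, if_neg (fun h => ha (hA.2 h))]
        by_cases hd : (((p0 :: rest).zip rest).all fun q => decide (q.1 ≥ q.2)) = true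
        · rw [if_pos hd, if_pos (hD.1 hd)]
          have hch : List.IsChain (fun a b : Int => b ≤ a) (p0 :: rest) := by
            simpa [ge_iff_le] using
              (pvZipAll_iff (fun q => decide (q.1 ≥ q.2)) (p0 :: rest)).1 (by simpa using hd)
          have hW := pvWeak_iff_desc (p0 :: rest) hch
          simp only [List.tail_cons] at hW
          by_cases hwk : (((p0 :: rest).zip rest).any fun q => q.1 == q.2) = true
          · have hnd : ¬ (p0 :: rest).Nodup := fun h => by
              rw [hW.2 h] at hwk; exact Bool.false_ne_true hwk
            rw [if_pos hwk, if_neg (fun h => hnd (hN.1 h))]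
          · have hnd : (p0 :: rest).Nodup := hW.1 (Bool.eq_false_iff.2 hwk)
            rw [if_neg hwk, if_pos (hN.2 hnd)]
        · rw [if_neg hd, if_neg (fun h => hd (hD.2 h))]
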